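-- pv_equiv track=rewrite | github.com/aaronlbrink/cover-letter-generator | apply.py | find_relevant_attributes
-- ===== SOURCE A (Python) =====
-- def find_relevant_attributes(
--     attributes: dict[str, list[list[str]]], job_description: str
-- ) -> dict[str, list]:
--   all_relevant_attributes = {}
--   job_description_lc = job_description.lower()
--   for attr_category in attributes:
--     rel_attr_in_category = []
--     for tool_spellings in attributes[attr_category]:
--       for tool in tool_spellings:
--         if tool.lower() in job_description_lc:
--           rel_attr_in_category.append(tool)
--           break
--     # Default (if no matches)
--     if len(rel_attr_in_category) == 0:
--       for tool_spellings in attributes[attr_category]: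
--         for tool in tool_spellings:
--           rel_attr_in_category.append(tool)
--           break
--     all_relevant_attributes[attr_category] = rel_attr_in_category
--   return all_relevant_attributes
-- ===== SOURCE B (Python) =====
-- def find_relevant_attributes(attributes, job_description):
--   jd = job_description.lower()
--   n = len(jd)
--   # index phase: for each distinct spelling length, the set of all jd substrings of that length
--   lengths = {len(t) for groups in attributes.values() for g in groups for t in g}
--   subs = {L: {jd[i:i + L] for i in range(n - L + 1)} for L in lengths}
--   def hit(t):
--     return t.lower() in subs[len(t)]
--   out = {}
--   for category, groups in attributes.items():
--     picks = [p for p in (next((t for t in g if hit(t)), None) for g in groups) if p is not None]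
--     out[category] = picks if picks else [g[0] for g in groups if g]
--   return out
-- ===== Notes on version B (the rewrite author's own statement) =====
-- stated objective: faster
-- what changed: B first builds an index of the lowered job description - one hash set of all its substrings per distinct spelling length - so each spelling is tested by a single O(L) set lookup instead of an O(|jd|*L) scan; selection is then a pure pass over the categories.
import Mathlib
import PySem

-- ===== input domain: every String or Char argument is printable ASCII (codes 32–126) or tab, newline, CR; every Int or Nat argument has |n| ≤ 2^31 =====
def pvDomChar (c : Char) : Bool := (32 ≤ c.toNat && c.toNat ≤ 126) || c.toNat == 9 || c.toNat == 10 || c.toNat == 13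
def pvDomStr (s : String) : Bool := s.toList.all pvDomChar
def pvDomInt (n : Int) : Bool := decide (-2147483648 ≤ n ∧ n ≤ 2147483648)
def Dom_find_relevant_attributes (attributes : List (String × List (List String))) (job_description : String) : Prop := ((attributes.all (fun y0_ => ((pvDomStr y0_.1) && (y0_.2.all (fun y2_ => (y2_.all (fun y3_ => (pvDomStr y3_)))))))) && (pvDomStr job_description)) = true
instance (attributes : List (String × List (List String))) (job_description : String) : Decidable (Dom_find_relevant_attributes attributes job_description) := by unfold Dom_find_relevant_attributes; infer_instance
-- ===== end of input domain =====

-- ===== PORT A =====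
-- B replaces A's per-spelling substring scans of the job description by a precomputed
-- per-length substring index of the lowered job description (set lookups), then a pure
-- selection pass (faster; return value only — neither program mutates its input).

-- inner loop 'for tool in tool_spellings: if tool.lower() in job_description_lc: rel.append(tool); break'
def pvA_scanGroup (jdlc : String) (rel : List String) : List String → List String
  | [] => rel
  | t :: ts =>
    if PySem.Str.isIn (PySem.Str.lower t) jdlc then rel ++ [t] else pvA_scanGroup jdlc rel ts

-- default inner loop 'for tool in tool_spellings: rel.append(tool); break'
def pvA_defGroup (rel : List String) : List String → List String
  | [] => rel
  | t :: _ => rel ++ [t]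

-- body of the outer loop for one category
def pvA_category (jdlc : String) (groups : List (List String)) : List String :=
  let rel := groups.foldl (pvA_scanGroup jdlc) []
  if rel.length = 0 then groups.foldl pvA_defGroup rel else rel

def find_relevant_attributes (attributes : List (String × List (List String))) (job_description : String) : List (String × List String) :=
  let jdlc := PySem.Str.lower job_description
  (attributes.foldl
    (fun (d : PySem.Dict String (List String)) kv => d.insert kv.1 (pvA_category jdlc kv.2))
    PySem.Dict.empty).items

-- ===== PORT B =====
-- lengths = {len(t) for groups in attributes.values() for g in groups for t in g}
def pvB_allLens (attributes : List (String × List (List String))) : PySem.Set Int :=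
  PySem.Set.ofList ((attributes.map Prod.snd).flatMap
    (fun groups => groups.flatMap (fun g => g.map PySem.Str.len)))

-- {jd[i:i+L] for i in range(n - L + 1)}  (jd as its char list; the slice is PySem.List.slice)
def pvB_subsOf (jdl : List Char) (L : Int) : PySem.Set (List Char) :=
  PySem.Set.ofList ((PySem.List.pyRange 0 ((jdl.length : Int) - L + 1) 1).map
    (fun i => PySem.List.slice jdl (some i) (some (i + L))))

-- subs = {L: {…} for L in lengths}
def pvB_buildSubs (jdl : List Char) (lens : List Int) : PySem.Dict Int (PySem.Set (List Char)) :=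
  lens.foldl (fun d L => d.insert L (pvB_subsOf jdl L)) PySem.Dict.empty

-- def hit(t): return t.lower() in subs[len(t)]   (len(t) is always a key; default never read)
def pvB_hit (subs : PySem.Dict Int (PySem.Set (List Char))) (t : String) : Bool :=
  PySem.Set.contains (subs.getD (PySem.Str.len t) PySem.Set.empty) (PySem.Chars.lower t.toList)

-- next((t for t in g if hit(t)), None)
def pvB_first (subs : PySem.Dict Int (PySem.Set (List Char))) (g : List String) : Option String :=
  g.find? (pvB_hit subs)

def pvB_category (subs : PySem.Dict Int (PySem.Set (List Char))) (groups : List (List String)) : List String :=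
  let picks := groups.filterMap (pvB_first subs)
  if picks.isEmpty then groups.filterMap List.head? else picks

def find_relevant_attributes_alt (attributes : List (String × List (List String))) (job_description : String) : List (String × List String) :=
  let jdl := PySem.Chars.lower job_description.toList
  let subs := pvB_buildSubs jdl (pvB_allLens attributes)
  attributes.map (fun kv => (kv.1, pvB_category subs kv.2))

-- ===== PRECONDITION & SPEC =====
-- Pre_ excludes association lists with duplicate category keys: A's parameter is a dict,
-- which cannot contain them, and their collapse under dict conversion is an artefact of that conversion.
def Pre_find_relevant_attributes (attributes : List (String × List (List String))) (job_description : String) : Prop :=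
  (attributes.map Prod.fst).Nodup
instance (attributes : List (String × List (List String))) (job_description : String) : Decidable (Pre_find_relevant_attributes attributes job_description) := by unfold Pre_find_relevant_attributes; infer_instance
def pvWitness_find_relevant_attributes : (List (String × List (List String))) × String :=
  ([("lang", [["Py", "py"], ["Go"]]), ("db", [["SQL"]])], "we use go and PY")

def Spec_find_relevant_attributes (attributes : List (String × List (List String))) (job_description : String) (out : List (String × List String)) : Prop := out = find_relevant_attributes_alt attributes job_description
instance (attributes : List (String × List (List String))) (job_description : String) (out : List (String × List String)) : Decidable (Spec_find_relevant_attributes attributes job_description out) := by unfold Spec_find_relevant_attributes; infer_instance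

-- ===== CLAIM (what is proved, stated in full; the proofs are below) =====
def Claim_equal_find_relevant_attributes : Prop := ∀ (attributes : List (String × List (List String))) (job_description : String), Dom_find_relevant_attributes attributes job_description → Pre_find_relevant_attributes attributes job_description → Spec_find_relevant_attributes attributes job_description (find_relevant_attributes attributes job_description)

-- ===== LEMMAS AND PROOFS =====

-- find? only looks at members
theorem find?_congr_mem {α : Type} {p q : α → Bool} (l : List α)
    (h : ∀ x ∈ l, p x = q x) : l.find? p = l.find? q := by
  induction l with
  | nil => rfl
  | cons x xs ih =>
    simp only [List.find?_cons]
    rw [h x (by simp)]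
    cases q x
    · exact ih (fun y hy => h y (by simp [hy]))
    · rfl

-- a dict comprehension keyed by L with value f L: lookup of a present key returns f
theorem getD_build (f : Int → PySem.Set (List Char)) (xs : List Int)
    (d : PySem.Dict Int (PySem.Set (List Char))) (k : Int) (v0 : PySem.Set (List Char)) :
    (xs.foldl (fun d L => d.insert L (f L)) d).getD k v0
      = if k ∈ xs then f k else d.getD k v0 := by
  induction xs generalizing d with
  | nil => simp
  | cons x xs ih =>
    simp only [List.foldl_cons, ih, PySem.Dict.getD_insert, List.mem_cons]
    by_cases hx : k ∈ xs
    · simp [hx]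
    · by_cases hk : k = x <;> simp [hx, hk]

-- infix = some window of the right length
theorem infix_iff_window (p s : List Char) :
    p <:+: s ↔ ∃ n : Nat, n + p.length ≤ s.length ∧ (s.drop n).take p.length = p := by
  constructor
  · rintro ⟨t₁, t₂, rfl⟩
    refine ⟨t₁.length, by simp, ?_⟩
    rw [List.append_assoc, List.drop_left, List.take_left]
  · rintro ⟨n, _, hw⟩
    exact hw ▸ (List.take_prefix _ _).isInfix.trans (List.drop_suffix _ _).isInfix

-- a fixed-length slice window, with a Nat starting point
theorem slice_window (jdl : List Char) (n L : Nat) :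
    PySem.List.slice jdl (some ((n : Nat) : Int)) (some (((n : Nat) : Int) + ((L : Nat) : Int)))
      = (jdl.drop n).take L := by
  rw [show ((n:Nat):Int) + ((L:Nat):Int) = ((n + L : Nat) : Int) by push_cast; ring,
    PySem.List.slice_natCast]
  simp

-- membership in the per-length substring set is infix
theorem mem_subsOf (jdl tl : List Char) :
    tl ∈ pvB_subsOf jdl ((tl.length : Nat) : Int) ↔ tl <:+: jdl := by
  unfold pvB_subsOf
  rw [PySem.Set.mem_ofList, List.mem_map, infix_iff_window]
  constructor
  · rintro ⟨i, hi, hsl⟩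
    rw [PySem.List.mem_pyRange_one] at hi
    refine ⟨i.toNat, by omega, ?_⟩
    rw [show i = ((i.toNat : Nat) : Int) by omega, slice_window] at hsl
    exact hsl
  · rintro ⟨n, hn, hw⟩
    refine ⟨((n : Nat) : Int), ?_, ?_⟩
    · rw [PySem.List.mem_pyRange_one]; omega
    · rw [slice_window]; exact hw

-- membership in the per-length substring set is exactly Python's 'in' test
theorem contains_subsOf (jdl tl : List Char) :
    PySem.Set.contains (pvB_subsOf jdl ((tl.length : Nat) : Int)) tl
      = PySem.Chars.isIn tl jdl := by
  rw [Bool.eq_iff_iff, PySem.Chars.isIn_iff_infix, ← mem_subsOf]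
  simp [PySem.Set.contains]

def pvA_first (jdlc : String) (g : List String) : Option String :=
  g.find? (fun t => PySem.Str.isIn (PySem.Str.lower t) jdlc)

-- A's break-scan of one group appends the first matching spelling, if any
theorem pvA_scanGroup_eq (jdlc : String) (rel : List String) (g : List String) :
    pvA_scanGroup jdlc rel g = rel ++ (pvA_first jdlc g).toList := by
  induction g with
  | nil => simp [pvA_scanGroup, pvA_first]
  | cons t ts ih =>
    simp only [pvA_scanGroup, pvA_first, List.find?_cons]
    cases h : PySem.Chars.isIn (PySem.Chars.lower t.toList) jdlc.toList
    · simpa [h, pvA_first] using ih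
    · simp [h]

theorem foldl_scan_eq (jdlc : String) (groups : List (List String)) (init : List String) :
    groups.foldl (pvA_scanGroup jdlc) init = init ++ groups.filterMap (pvA_first jdlc) := by
  induction groups generalizing init with
  | nil => simp
  | cons g gs ih =>
    simp only [List.foldl_cons, ih, pvA_scanGroup_eq, List.filterMap_cons]
    cases pvA_first jdlc g <;> simp

theorem foldl_def_eq (groups : List (List String)) (init : List String) :
    groups.foldl pvA_defGroup init = init ++ groups.filterMap List.head? := by
  induction groups generalizing init with
  | nil => simp
  | cons g gs ih =>
    cases g <;> simp [List.foldl_cons, pvA_defGroup, ih]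

-- B's hit test, on a spelling whose length is a key, is exactly A's substring test
theorem hit_eq (jd : String) (lens : List Int) (t : String)
    (hm : PySem.Str.len t ∈ lens) :
    pvB_hit (pvB_buildSubs (PySem.Chars.lower jd.toList) lens) t
      = PySem.Str.isIn (PySem.Str.lower t) (PySem.Str.lower jd) := by
  unfold pvB_hit pvB_buildSubs
  rw [getD_build, if_pos hm]
  have hlen : PySem.Str.len t = (((PySem.Chars.lower t.toList).length : Nat) : Int) := by
    simp [PySem.Str.len_eq, PySem.Chars.lower]
  rw [hlen, contains_subsOf]
  simp [PySem.Str.isIn, PySem.Str.toList_lower]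

-- one category: A's two-pass fold equals B's index-based selection
theorem category_eq (jd : String) (lens : List Int) (groups : List (List String))
    (hall : ∀ g ∈ groups, ∀ t ∈ g, PySem.Str.len t ∈ lens) :
    pvA_category (PySem.Str.lower jd) groups
      = pvB_category (pvB_buildSubs (PySem.Chars.lower jd.toList) lens) groups := by
  unfold pvA_category pvB_category pvB_first
  rw [List.filterMap_congr (g := fun g => pvA_first (PySem.Str.lower jd) g)
      (fun g hg => find?_congr_mem g (fun t ht => hit_eq jd lens t (hall g hg t ht)))]
  simp only [foldl_scan_eq, foldl_def_eq, List.nil_append]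
  rcases h : groups.filterMap (pvA_first (PySem.Str.lower jd)) with _ | _ <;> simp [h]

-- ===== VERDICT (by name: the statement is the Claim_ definition above) =====
theorem find_relevant_attributes_spec : Claim_equal_find_relevant_attributes := by
  intro attributes job_description _ hpre
  unfold Pre_find_relevant_attributes at hpre
  unfold Spec_find_relevant_attributes find_relevant_attributes find_relevant_attributes_alt
  have hcat : ∀ kv ∈ attributes,
      pvA_category (PySem.Str.lower job_description) kv.2
        = pvB_category (pvB_buildSubs (PySem.Chars.lower job_description.toList)
            (pvB_allLens attributes)) kv.2 := by
    intro kv hkv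
    refine category_eq _ _ _ ?_
    intro g hg t ht
    unfold pvB_allLens
    rw [PySem.Set.mem_ofList]
    simp only [List.mem_flatMap, List.mem_map]
    exact ⟨kv.2, ⟨kv, hkv, rfl⟩, g, hg, ⟨t, ht, rfl⟩⟩
  have hmap : attributes.map (fun kv => (kv.1, pvA_category (PySem.Str.lower job_description) kv.2))
      = attributes.map (fun kv => (kv.1, pvB_category (pvB_buildSubs
          (PySem.Chars.lower job_description.toList) (pvB_allLens attributes)) kv.2)) :=
    List.map_congr_left (fun kv hkv => by rw [hcat kv hkv])
  have h := PySem.Dict.items_foldl_insert_fresh attributes Prod.fst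
      (fun kv => pvA_category (PySem.Str.lower job_description) kv.2) PySem.Dict.empty
      (by intro a _; simp) hpre
  simpa [hmap] using h
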